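-- pv_equiv track=rewrite | github.com/oferwess/Build_AWS_Deploy | task3-Python/snapshot.py | find_minimum
-- ===== SOURCE A (Python) =====
-- def find_minimum (snapshots_array):
--         index=0
--         minimum = 0
--         for eachitem in snapshots_array:
--             if eachitem["date"] < snapshots_array[minimum]["date"]:
--                 minimum=index
--             index=index+1
--         return (snapshots_array[minimum])
-- ===== SOURCE B (Python) =====
-- def find_minimum(snapshots_array):
--     return sorted(snapshots_array, key=lambda s: s["date"])[0]
-- ===== Notes on version B (the rewrite author's own statement) =====
-- stated objective: simpler
-- what changed: Replaces the hand-written index-tracking linear minimum scan with a stable sort by date followed by taking the first element; stability reproduces A's first-occurrence tie-breaking.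
import Mathlib
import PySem

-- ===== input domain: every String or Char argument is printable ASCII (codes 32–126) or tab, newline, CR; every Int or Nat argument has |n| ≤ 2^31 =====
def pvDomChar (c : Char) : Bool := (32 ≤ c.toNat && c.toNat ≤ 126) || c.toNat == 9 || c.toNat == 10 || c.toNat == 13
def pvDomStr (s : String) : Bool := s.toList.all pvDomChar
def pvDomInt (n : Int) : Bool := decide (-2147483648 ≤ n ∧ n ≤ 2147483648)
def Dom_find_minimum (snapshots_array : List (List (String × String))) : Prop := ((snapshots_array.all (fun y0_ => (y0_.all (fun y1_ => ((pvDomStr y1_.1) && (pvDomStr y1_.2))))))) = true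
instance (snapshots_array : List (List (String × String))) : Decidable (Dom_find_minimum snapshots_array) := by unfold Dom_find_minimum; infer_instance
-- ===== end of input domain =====

-- B replaces A's index-tracking linear minimum scan by a stable sort by date plus
-- taking the first element (objective: simpler); equal return value on Pre_.

-- shared helper: eachitem["date"]; exact under Pre_find_minimum, which guarantees the key is present
def dateOf (d : List (String × String)) : String := (PySem.Dict.get? (PySem.Dict.mk d) "date").getD ""

-- ===== PORT A =====
def find_minimum (snapshots_array : List (List (String × String))) : List (String × String) :=
  -- index=0; minimum=0; for eachitem: if eachitem["date"] < snapshots_array[minimum]["date"]: minimum=index; index=index+1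
  let st : Int × Int := snapshots_array.foldl
    (fun (s : Int × Int) eachitem =>
      (s.1 + 1,
       if dateOf eachitem < dateOf ((PySem.List.pyGet? snapshots_array s.2).getD []) then s.1 else s.2))
    (0, 0)
  (PySem.List.pyGet? snapshots_array st.2).getD []

-- ===== PORT B =====
def find_minimum_alt (snapshots_array : List (List (String × String))) : List (String × String) :=
  -- return sorted(snapshots_array, key=lambda s: s["date"])[0]
  (PySem.List.pyGet? (PySem.List.sorted snapshots_array dateOf false) 0).getD []

-- ===== PRECONDITION & SPEC =====
-- Pre_ excludes exactly the inputs where Python A raises: the empty list (IndexError)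
-- and lists with an item lacking the "date" key (KeyError).
def Pre_find_minimum (snapshots_array : List (List (String × String))) : Prop :=
  snapshots_array ≠ [] ∧ ∀ d ∈ snapshots_array, (PySem.Dict.get? (PySem.Dict.mk d) "date").isSome = true
instance (snapshots_array : List (List (String × String))) : Decidable (Pre_find_minimum snapshots_array) := by unfold Pre_find_minimum; infer_instance
def pvWitness_find_minimum : (List (List (String × String))) := [[("date", "2020-01-01")], [("date", "2019-12-31")]]

def Spec_find_minimum (snapshots_array : List (List (String × String))) (out : List (String × String)) : Prop := out = find_minimum_alt snapshots_array
instance (snapshots_array : List (List (String × String))) (out : List (String × String)) : Decidable (Spec_find_minimum snapshots_array out) := by unfold Spec_find_minimum; infer_instance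

-- ===== CLAIM (what is proved, stated in full; the proofs are below) =====
def Claim_equal_find_minimum : Prop := ∀ (snapshots_array : List (List (String × String))), Dom_find_minimum snapshots_array → Pre_find_minimum snapshots_array → Spec_find_minimum snapshots_array (find_minimum snapshots_array)

-- ===== LEMMAS AND PROOFS =====

-- the first-minimum fold both sides reduce to
def fmin (cur : List (String × String)) (l : List (List (String × String))) : List (String × String) :=
  l.foldl (fun c y => if dateOf y < dateOf c then y else c) cur

-- B side: the head of the insertion-sort fold is the first minimum
theorem head?_sort_fold (l : List (List (String × String))) :
    ∀ (m : List (String × String)) (t : List (List (String × String))),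
      ((l.foldl (fun a x => PySem.List.insertBy (fun p q => decide (dateOf p < dateOf q)) x a) (m :: t)).head?
        = some (fmin m l)) := by
  induction l with
  | nil => intro m t; simp [fmin]
  | cons x l ih =>
    intro m t
    simp only [fmin, List.foldl]
    by_cases hlt : dateOf x < dateOf m
    · have hins : PySem.List.insertBy (fun p q => decide (dateOf p < dateOf q)) x (m :: t)
          = x :: m :: t := by
        simp [PySem.List.insertBy, hlt]
      rw [hins, if_pos hlt]
      simpa [fmin] using ih x (m :: t)
    · have hins : PySem.List.insertBy (fun p q => decide (dateOf p < dateOf q)) x (m :: t)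
          = m :: PySem.List.insertBy (fun p q => decide (dateOf p < dateOf q)) x t := by
        simp [PySem.List.insertBy, hlt]
      rw [hins, if_neg hlt]
      simpa [fmin] using ih m _

-- A side: the index-tracking loop, started at suffix position k with a champion
-- looked up at index mi, ends looking up the first minimum
theorem loopA (xs : List (List (String × String))) :
    ∀ (l : List (List (String × String))) (k : Nat) (mi : Int) (cur : List (String × String)),
      xs.drop k = l →
      PySem.List.pyGet? xs mi = some cur →
      (PySem.List.pyGet? xs
        (l.foldl (fun (s : Int × Int) eachitem =>
            (s.1 + 1,
             if dateOf eachitem < dateOf ((PySem.List.pyGet? xs s.2).getD []) then s.1 else s.2))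
          ((k : Int), mi)).2).getD []
        = fmin cur l := by
  intro l
  induction l with
  | nil => intro k mi cur _ hget; simp [fmin, hget]
  | cons x l ih =>
    intro k mi cur hdrop hget
    have hk : xs[k]? = some x := by
      have h0 : (xs.drop k)[0]? = some x := by rw [hdrop]; rfl
      rwa [List.getElem?_drop, Nat.add_zero] at h0
    have hdrop' : xs.drop (k + 1) = l := by
      rw [← List.tail_drop, hdrop]; rfl
    have hcast : ((k : Int) + 1) = ((k + 1 : Nat) : Int) := by push_cast; ring
    simp only [List.foldl_cons, hget, Option.getD_some, fmin, hcast]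
    by_cases hlt : dateOf x < dateOf cur
    · rw [if_pos hlt, if_pos hlt]
      have hgk : PySem.List.pyGet? xs ((k : Nat) : Int) = some x := by
        rw [PySem.List.pyGet?_natCast]; exact hk
      exact ih (k + 1) ((k : Nat) : Int) x hdrop' hgk
    · rw [if_neg hlt, if_neg hlt]
      exact ih (k + 1) mi cur hdrop' hget

-- ===== VERDICT (by name: the statement is the Claim_ definition above) =====
theorem find_minimum_spec : Claim_equal_find_minimum := by
  intro xs _ hpre
  unfold Pre_find_minimum at hpre
  unfold Spec_find_minimum find_minimum find_minimum_alt
  cases xs with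
  | nil => exact absurd rfl hpre.1
  | cons x rest =>
    -- A side: the loop ends looking up the first minimum
    have hget0 : PySem.List.pyGet? (x :: rest) (0 : Int) = some x := by
      have h := PySem.List.pyGet?_natCast (x :: rest) 0
      rw [Nat.cast_zero] at h; rw [h]; rfl
    have hA := loopA (x :: rest) (x :: rest) 0 0 x rfl hget0
    have hAeq : (PySem.List.pyGet? (x :: rest)
        ((x :: rest).foldl (fun (s : Int × Int) eachitem =>
            (s.1 + 1,
             if dateOf eachitem < dateOf ((PySem.List.pyGet? (x :: rest) s.2).getD []) then s.1 else s.2))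
          (0, 0)).2).getD [] = fmin x rest := by
      have h2 : fmin x (x :: rest) = fmin x rest := by
        simp [fmin]
      rw [← h2]; simpa using hA
    rw [hAeq]
    -- B side: the head of the sort is the first minimum
    have hacc : PySem.List.insertBy (fun p q => decide (dateOf p < dateOf q)) x
        ([] : List (List (String × String))) = [x] := by
      simp [PySem.List.insertBy]
    have hB := head?_sort_fold rest x []
    rw [PySem.List.sorted_eq_foldl_insertBy]
    simp only [List.foldl_cons]
    rw [hacc]
    cases hhd : ((rest.foldl (fun a y => PySem.List.insertBy (fun p q => decide (dateOf p < dateOf q)) y a)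
        ([x]))) with
    | nil => rw [hhd] at hB; simp at hB
    | cons m t =>
      rw [hhd] at hB
      simp only [List.head?_cons, Option.some.injEq] at hB
      have hget : PySem.List.pyGet? (m :: t) (0 : Int) = some m := by
        have h := PySem.List.pyGet?_natCast (m :: t) 0
        rw [Nat.cast_zero] at h; rw [h]; rfl
      rw [hget, Option.getD_some, ← hB]
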